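-- pv_equiv track=rewrite | github.com/SeongBeomLEE/CodingTest | BaaaaaaaarkingDog/0x03/03.py | solution
-- ===== SOURCE A (Python) =====
-- def solution(num : str):
--     answer = [0] * 10
--     for n in num:
--         if n == '6':
--             if answer[int(n)] <= answer[int("9")]: answer[int(n)] += 1
--             else: answer[int("9")] += 1
--         elif n == '9':
--             if answer[int(n)] <= answer[int("6")]: answer[int(n)] += 1
--             else: answer[int("6")] += 1
--         else: answer[int(n)] += 1
--     return max(answer)
-- ===== SOURCE B (Python) =====
-- def solution(num : str):
--     count = [0] * 10
--     for n in num: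
--         count[int(n)] += 1
--     t = count[6] + count[9]
--     count[6] = count[9] = (t + 1) // 2
--     return max(count)
-- ===== Notes on version B (the rewrite author's own statement) =====
-- stated objective: simpler
-- what changed: A balances the 6/9 counters incrementally with nested branches inside the loop; B counts raw digits in one plain loop and collapses the interchangeable 6/9 pair afterwards with the single closed form ceil((c6+c9)/2) before taking the max.
import Mathlib
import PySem

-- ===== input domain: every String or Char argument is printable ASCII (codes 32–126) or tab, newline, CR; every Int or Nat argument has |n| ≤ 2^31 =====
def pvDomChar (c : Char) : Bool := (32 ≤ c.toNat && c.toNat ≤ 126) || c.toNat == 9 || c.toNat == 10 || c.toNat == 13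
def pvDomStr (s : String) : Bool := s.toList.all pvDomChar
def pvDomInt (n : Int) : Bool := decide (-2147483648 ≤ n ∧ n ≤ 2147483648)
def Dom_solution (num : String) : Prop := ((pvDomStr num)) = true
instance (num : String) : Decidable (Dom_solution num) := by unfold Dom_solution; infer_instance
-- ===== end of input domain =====

-- B replaces A's in-loop 6/9 balancing branches by a raw digit count plus one post-loop
-- ceil((c6+c9)/2) collapse step: simpler decomposition, same values on all-digit inputs.


-- ===== PORT A =====
-- int(n) for the single character n; Python raises ValueError on non-digits — those inputs are excluded by Pre_
def pvDigit (n : Char) : Int := (PySem.Int.ofChars? [n]).getD 0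

-- answer[i] += 1
def pvIncr (answer : List Int) (i : Int) : List Int :=
  PySem.List.pySetD answer i (PySem.List.pyGetD answer i 0 + 1)

-- one iteration of A's for-loop body
def pvStepA (answer : List Int) (n : Char) : List Int :=
  if n = '6' then
    if PySem.List.pyGetD answer (pvDigit n) 0 ≤ PySem.List.pyGetD answer 9 0 then
      pvIncr answer (pvDigit n)
    else pvIncr answer 9
  else if n = '9' then
    if PySem.List.pyGetD answer (pvDigit n) 0 ≤ PySem.List.pyGetD answer 6 0 then
      pvIncr answer (pvDigit n)
    else pvIncr answer 6
  else pvIncr answer (pvDigit n)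

def solution (num : String) : Int :=
  let answer := num.toList.foldl pvStepA (List.replicate 10 0)
  (PySem.List.max? answer (fun y => y)).getD 0

-- ===== PORT B =====
def solution_alt (num : String) : Int :=
  let count := num.toList.foldl (fun count n => pvIncr count (pvDigit n)) (List.replicate 10 0)
  let t := PySem.List.pyGetD count 6 0 + PySem.List.pyGetD count 9 0
  let m := PySem.Int.floordiv (t + 1) 2
  let count := PySem.List.pySetD (PySem.List.pySetD count 6 m) 9 m
  (PySem.List.max? count (fun y => y)).getD 0

-- ===== PRECONDITION & SPEC =====
-- Pre_ excludes exactly the strings containing a non-digit character, on which A's int(n) raises ValueError.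
def Pre_solution (num : String) : Prop := (num.toList.all Char.isDigit) = true
instance (num : String) : Decidable (Pre_solution num) := by unfold Pre_solution; infer_instance

def pvWitness_solution : String := "9660919"

def Spec_solution (num : String) (out : Int) : Prop := out = solution_alt num
instance (num : String) (out : Int) : Decidable (Spec_solution num out) := by unfold Spec_solution; infer_instance

-- ===== CLAIM (what is proved, stated in full; the proofs are below) =====
def Claim_equal_solution : Prop := ∀ (num : String), Dom_solution num → Pre_solution num → Spec_solution num (solution num)

-- ===== LEMMAS AND PROOFS =====

-- invariant relating A's balanced 6/9 counters to B's raw counters: slots other than 6 and 9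
-- agree, the 6+9 totals agree, and A's two counters are nonnegative and differ by at most 1
def pvInv (a c : List Int) : Prop :=
  a.length = 10 ∧ c.length = 10 ∧
  (∀ k : Nat, k < 10 → k ≠ 6 → k ≠ 9 → a.getD k 0 = c.getD k 0) ∧
  a.getD 6 0 + a.getD 9 0 = c.getD 6 0 + c.getD 9 0 ∧
  0 ≤ a.getD 6 0 ∧ 0 ≤ a.getD 9 0 ∧
  a.getD 6 0 - a.getD 9 0 ≤ 1 ∧ a.getD 9 0 - a.getD 6 0 ≤ 1

lemma char_eq_of_toNat (c : Char) (n : Nat) (d : Char) (h : c.toNat = n) (hd : d.toNat = n) : c = d := by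
  apply Char.ext
  apply UInt32.toNat_inj.mp
  show c.toNat = d.toNat
  omega

lemma isDigit_toNat (c : Char) (h : c.isDigit) : 48 ≤ c.toNat ∧ c.toNat ≤ 57 := by
  simp [Char.isDigit, UInt32.le_iff_toNat_le] at h
  exact h

lemma ofChars_digit (c : Char) (h : c.isDigit) :
    PySem.Int.ofChars? [c] = some ((c.toNat : Int) - 48) := by
  have hb := isDigit_toNat c h
  have h10 : c.toNat = 48 ∨ c.toNat = 49 ∨ c.toNat = 50 ∨ c.toNat = 51 ∨ c.toNat = 52 ∨
      c.toNat = 53 ∨ c.toNat = 54 ∨ c.toNat = 55 ∨ c.toNat = 56 ∨ c.toNat = 57 := by omega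
  rcases h10 with h2|h2|h2|h2|h2|h2|h2|h2|h2|h2 <;>
    first
    | (rw [char_eq_of_toNat c _ '0' h2 (by decide)]; decide)
    | (rw [char_eq_of_toNat c _ '1' h2 (by decide)]; decide)
    | (rw [char_eq_of_toNat c _ '2' h2 (by decide)]; decide)
    | (rw [char_eq_of_toNat c _ '3' h2 (by decide)]; decide)
    | (rw [char_eq_of_toNat c _ '4' h2 (by decide)]; decide)
    | (rw [char_eq_of_toNat c _ '5' h2 (by decide)]; decide)
    | (rw [char_eq_of_toNat c _ '6' h2 (by decide)]; decide)
    | (rw [char_eq_of_toNat c _ '7' h2 (by decide)]; decide)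
    | (rw [char_eq_of_toNat c _ '8' h2 (by decide)]; decide)
    | (rw [char_eq_of_toNat c _ '9' h2 (by decide)]; decide)

lemma pvDigit_spec (n : Char) (h : n.isDigit) :
    ∃ k : Nat, k < 10 ∧ pvDigit n = (k : Int) ∧ (k = 6 ↔ n = '6') ∧ (k = 9 ↔ n = '9') := by
  have hb := isDigit_toNat n h
  have hd : pvDigit n = ((n.toNat : Int) - 48) := by
    unfold pvDigit
    rw [ofChars_digit n h]
    rfl
  refine ⟨n.toNat - 48, by omega, by rw [hd]; omega, ?_, ?_⟩
  · constructor
    · intro hk; exact char_eq_of_toNat n 54 '6' (by omega) (by decide)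
    · intro hk; subst hk; decide
  · constructor
    · intro hk; exact char_eq_of_toNat n 57 '9' (by omega) (by decide)
    · intro hk; subst hk; decide

lemma getD_pvIncr (a : List Int) (i : Int) (j : Nat) (h0 : 0 ≤ i) (hi : i < a.length) :
    (pvIncr a i).getD j 0 = if (j : Int) = i then a.getD j 0 + 1 else a.getD j 0 := by
  obtain ⟨k, rfl⟩ : ∃ k : Nat, i = (k : Int) := ⟨i.toNat, (Int.toNat_of_nonneg h0).symm⟩
  unfold pvIncr
  rw [PySem.List.pySetD_natCast, PySem.List.pyGetD_natCast]
  have hk : k < a.length := by exact_mod_cast hi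
  rcases eq_or_ne j k with rfl | hne
  · simp [List.getD, hk]
  · simp [List.getD, hne, hne.symm, Nat.cast_inj]

lemma length_pvIncr (a : List Int) (i : Int) : (pvIncr a i).length = a.length :=
  PySem.List.length_pySetD a i _

lemma stepA_six (a : List Int) : pvStepA a '6' =
    if PySem.List.pyGetD a 6 0 ≤ PySem.List.pyGetD a 9 0 then pvIncr a 6 else pvIncr a 9 := by
  have h : pvDigit '6' = 6 := by decide
  simp [pvStepA, h]

lemma stepA_nine (a : List Int) : pvStepA a '9' =
    if PySem.List.pyGetD a 9 0 ≤ PySem.List.pyGetD a 6 0 then pvIncr a 9 else pvIncr a 6 := by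
  have h : pvDigit '9' = 9 := by decide
  simp [pvStepA, h]

lemma stepA_other (a : List Int) (n : Char) (h6 : n ≠ '6') (h9 : n ≠ '9') :
    pvStepA a n = pvIncr a (pvDigit n) := by
  simp [pvStepA, h6, h9]

lemma pvStep_inv (a c : List Int) (n : Char) (hn : n.isDigit) (h : pvInv a c) :
    pvInv (pvStepA a n) (pvIncr c (pvDigit n)) := by
  obtain ⟨k, hk10, hdig, hk6, hk9⟩ := pvDigit_spec n hn
  obtain ⟨ha, hc, hoth, hsum, h0a, h0b, hd1, hd2⟩ := h
  have hIA : ∀ (i : Int), 0 ≤ i → i < 10 → ∀ j : Nat,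
      (pvIncr a i).getD j 0 = if (j : Int) = i then a.getD j 0 + 1 else a.getD j 0 :=
    fun i h1 h2 j => getD_pvIncr a i j h1 (by rw [ha]; exact_mod_cast h2)
  have hIC : ∀ (i : Int), 0 ≤ i → i < 10 → ∀ j : Nat,
      (pvIncr c i).getD j 0 = if (j : Int) = i then c.getD j 0 + 1 else c.getD j 0 :=
    fun i h1 h2 j => getD_pvIncr c i j h1 (by rw [hc]; exact_mod_cast h2)
  have hg9 : PySem.List.pyGetD a (9:Int) 0 = a.getD 9 0 := by
    exact_mod_cast PySem.List.pyGetD_natCast a 9 0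
  have hg6 : PySem.List.pyGetD a (6:Int) 0 = a.getD 6 0 := by
    exact_mod_cast PySem.List.pyGetD_natCast a 6 0
  have hklt : ((k:Int)) < 10 := by exact_mod_cast hk10
  rw [hdig]
  by_cases hn6 : n = '6'
  · have hke : k = 6 := hk6.mpr hn6
    subst hn6
    rw [stepA_six, hg6, hg9, hke]
    split_ifs with hcmp <;>
      refine ⟨by rw [length_pvIncr]; exact ha, by rw [length_pvIncr]; exact hc, ?_, ?_, ?_, ?_, ?_, ?_⟩ <;>
      (try (intro j hj hj6 hj9; have hj' := hoth j hj hj6 hj9)) <;>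
      simp only [hIA 6 (by omega) (by omega), hIA 9 (by omega) (by omega),
        hIC ((6:Nat):Int) (by omega) (by omega)] <;>
      split_ifs <;> omega
  · by_cases hn9 : n = '9'
    · have hke : k = 9 := hk9.mpr hn9
      subst hn9
      rw [stepA_nine, hg6, hg9, hke]
      split_ifs with hcmp <;>
        refine ⟨by rw [length_pvIncr]; exact ha, by rw [length_pvIncr]; exact hc, ?_, ?_, ?_, ?_, ?_, ?_⟩ <;>
        (try (intro j hj hj6 hj9; have hj' := hoth j hj hj6 hj9)) <;>
        simp only [hIA 6 (by omega) (by omega), hIA 9 (by omega) (by omega),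
          hIC ((9:Nat):Int) (by omega) (by omega)] <;>
        split_ifs <;> omega
    · have hkne6 : k ≠ 6 := fun hh => hn6 (hk6.mp hh)
      have hkne9 : k ≠ 9 := fun hh => hn9 (hk9.mp hh)
      rw [stepA_other a n hn6 hn9, hdig]
      refine ⟨by rw [length_pvIncr]; exact ha, by rw [length_pvIncr]; exact hc, ?_, ?_, ?_, ?_, ?_, ?_⟩ <;>
        (try (intro j hj hj6 hj9; have hj' := hoth j hj hj6 hj9)) <;>
        simp only [hIA ((k:Nat):Int) (by omega) hklt, hIC ((k:Nat):Int) (by omega) hklt] <;>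
        split_ifs <;> omega

lemma pvFold_inv (l : List Char) (hl : ∀ n ∈ l, n.isDigit) (a c : List Int) (h : pvInv a c) :
    pvInv (l.foldl pvStepA a) (l.foldl (fun c n => pvIncr c (pvDigit n)) c) := by
  induction l generalizing a c with
  | nil => exact h
  | cons x xs ih =>
      exact ih (fun n hn => hl n (List.mem_cons_of_mem _ hn)) _ _
        (pvStep_inv a c x (hl x (List.mem_cons_self)) h)

lemma pvList10 (x : List Int) (hx : x.length = 10) :
    ∃ x0 x1 x2 x3 x4 x5 x6 x7 x8 x9, x = [x0,x1,x2,x3,x4,x5,x6,x7,x8,x9] := by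
  rcases x with _ | ⟨x0, x⟩
  · simp at hx
  rcases x with _ | ⟨x1, x⟩
  · simp at hx
  rcases x with _ | ⟨x2, x⟩
  · simp at hx
  rcases x with _ | ⟨x3, x⟩
  · simp at hx
  rcases x with _ | ⟨x4, x⟩
  · simp at hx
  rcases x with _ | ⟨x5, x⟩
  · simp at hx
  rcases x with _ | ⟨x6, x⟩
  · simp at hx
  rcases x with _ | ⟨x7, x⟩
  · simp at hx
  rcases x with _ | ⟨x8, x⟩
  · simp at hx
  rcases x with _ | ⟨x9, x⟩
  · simp at hx
  rcases x with _ | ⟨y, x⟩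
  · exact ⟨_,_,_,_,_,_,_,_,_,_, rfl⟩
  · simp at hx

lemma pvMax_eq (a c : List Int) (h : pvInv a c) :
    (PySem.List.max? a (fun y => y)).getD 0 =
    (PySem.List.max? (PySem.List.pySetD (PySem.List.pySetD c 6
        (PySem.Int.floordiv (PySem.List.pyGetD c 6 0 + PySem.List.pyGetD c 9 0 + 1) 2)) 9
        (PySem.Int.floordiv (PySem.List.pyGetD c 6 0 + PySem.List.pyGetD c 9 0 + 1) 2))
      (fun y => y)).getD 0 := by
  obtain ⟨ha, hc, hoth, hsum, h0a, h0b, hd1, hd2⟩ := h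
  obtain ⟨a0,a1,a2,a3,a4,a5,a6,a7,a8,a9, rfl⟩ := pvList10 a ha
  obtain ⟨c0,c1,c2,c3,c4,c5,c6,c7,c8,c9, rfl⟩ := pvList10 c hc
  have e0 := hoth 0 (by omega) (by omega) (by omega)
  have e1 := hoth 1 (by omega) (by omega) (by omega)
  have e2 := hoth 2 (by omega) (by omega) (by omega)
  have e3 := hoth 3 (by omega) (by omega) (by omega)
  have e4 := hoth 4 (by omega) (by omega) (by omega)
  have e5 := hoth 5 (by omega) (by omega) (by omega)
  have e7 := hoth 7 (by omega) (by omega) (by omega)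
  have e8 := hoth 8 (by omega) (by omega) (by omega)
  simp [List.getD] at e0 e1 e2 e3 e4 e5 e7 e8 hsum h0a h0b hd1 hd2
  subst e0 e1 e2 e3 e4 e5 e7 e8
  rw [PySem.Int.floordiv_eq_ediv_of_pos (by omega)]
  have hs6 : ∀ (l : List Int) v, PySem.List.pySetD l (6:Int) v = l.set 6 v := fun l v => by
    exact_mod_cast PySem.List.pySetD_natCast l 6 v
  have hs9 : ∀ (l : List Int) v, PySem.List.pySetD l (9:Int) v = l.set 9 v := fun l v => by
    exact_mod_cast PySem.List.pySetD_natCast l 9 v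
  rw [hs6, hs9]
  simp only [pysem, List.getD, List.set, Option.getD_some, List.getElem?_cons_zero,
    List.getElem?_cons_succ, List.foldl]
  have hm : max a6 a9 = (c6 + c9 + 1) / 2 := by
    rcases le_total a6 a9 with hle | hle
    · rw [max_eq_right hle]; omega
    · rw [max_eq_left hle]; omega
  have l1 : max (max (max (max (max (max (max (max (max a0 a1) a2) a3) a4) a5) a6) a7) a8) a9
      = max (max (max (max (max (max (max (max a0 a1) a2) a3) a4) a5) a7) a8) (max a6 a9) := by ac_rfl
  have l2 : max (max (max (max (max (max (max (max (max a0 a1) a2) a3) a4) a5) ((c6 + c9 + 1) / 2)) a7) a8) ((c6 + c9 + 1) / 2)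
      = max (max (max (max (max (max (max (max a0 a1) a2) a3) a4) a5) a7) a8)
          (max ((c6 + c9 + 1) / 2) ((c6 + c9 + 1) / 2)) := by ac_rfl
  rw [l1, l2, hm, max_self]

-- ===== VERDICT (by name: the statement is the Claim_ definition above) =====
theorem solution_spec : Claim_equal_solution := by
  intro num _ hpre
  have hpre' : ∀ n ∈ num.toList, n.isDigit = true := List.all_eq_true.mp hpre
  unfold Spec_solution solution solution_alt
  have hinv : pvInv (num.toList.foldl pvStepA (List.replicate 10 0))
      (num.toList.foldl (fun c n => pvIncr c (pvDigit n)) (List.replicate 10 0)) := by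
    apply pvFold_inv _ hpre'
    unfold pvInv
    refine ⟨by simp, by simp, ?_, by simp, by simp, by simp, by simp, by simp⟩
    intro k hk _ _
    simp
  simpa using pvMax_eq _ _ hinv
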